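-- pv_equiv track=rewrite | github.com/mson1509/cs50mson | sentimental-credit/credit.py | every_other_digit
-- ===== SOURCE A (Python) =====
-- import math
--
-- def every_other_digit(number, from_last_digit):
--     digits = []
--     current_digit = from_last_digit
--     for i in range(len(str(number))):
--         if current_digit:
--             digit = math.floor(number % 10)
--             digits.append(digit)
--             number = math.floor(number / 10)
--             current_digit = not current_digit
--             i += 1
--         else:
--             number = math.floor(number / 10)
--             current_digit = not current_digit
--             i += 1
--     return digits
-- ===== SOURCE B (Python) =====
-- import math
--
-- def every_other_digit(number, from_last_digit):
--     digits = []
--     for _ in range(len(str(number))):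
--         digits.append(math.floor(number % 10))
--         number = math.floor(number / 10)
--     return digits[0::2] if from_last_digit else digits[1::2]
-- ===== Notes on version B (the rewrite author's own statement) =====
-- stated objective: alternative
-- what changed: B replaces A's conditional-append alternating loop with a uniform loop that extracts every digit, then takes every other digit with a step-2 slice chosen by the flag.
import Mathlib
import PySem

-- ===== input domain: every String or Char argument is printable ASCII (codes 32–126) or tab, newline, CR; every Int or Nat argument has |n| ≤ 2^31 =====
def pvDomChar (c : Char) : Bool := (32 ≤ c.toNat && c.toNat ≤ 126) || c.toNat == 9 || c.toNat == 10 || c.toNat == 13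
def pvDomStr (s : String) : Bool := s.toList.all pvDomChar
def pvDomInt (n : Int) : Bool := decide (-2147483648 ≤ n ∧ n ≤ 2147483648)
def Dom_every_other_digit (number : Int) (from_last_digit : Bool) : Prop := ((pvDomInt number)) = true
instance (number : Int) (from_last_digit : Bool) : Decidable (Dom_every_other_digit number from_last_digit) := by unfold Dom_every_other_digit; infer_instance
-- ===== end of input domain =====

-- B extracts all digits in one uniform loop and then keeps every other one via a
-- step-2 slice; A interleaves keep/skip inside a single alternating loop. Same cost.

-- ===== PORT A =====
-- A's loop, state (digits, current_digit, number), run len(str(number)) times.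
-- math.floor(number % 10) on an int is PySem.Int.mod number 10; math.floor(number / 10)
-- equals PySem.Int.floordiv number 10 exactly for |number| ≤ 2^31 (float division is
-- exact enough that flooring agrees with integer floor division on this domain).
def pvAloop : Nat → List Int → Bool → Int → List Int
  | 0, digits, _, _ => digits
  | n + 1, digits, cur, number =>
    if cur then
      pvAloop n (digits ++ [PySem.Int.mod number 10]) false (PySem.Int.floordiv number 10)
    else
      pvAloop n digits true (PySem.Int.floordiv number 10)

def every_other_digit (number : Int) (from_last_digit : Bool) : List Int :=
  pvAloop (PySem.Int.toStr number).length [] from_last_digit number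

-- ===== PORT B =====
-- B's uniform loop: append number % 10, number //= 10, len(str(number)) times.
def pvBdigits : Nat → Int → List Int
  | 0, _ => []
  | n + 1, number => PySem.Int.mod number 10 :: pvBdigits n (PySem.Int.floordiv number 10)

-- hand port of the step-2 slice xs[0::2] (PySem has no step slices); exact for step 2, start 0.
def pvEveryOther : List Int → List Int
  | [] => []
  | [x] => [x]
  | x :: _ :: r => x :: pvEveryOther r

def every_other_digit_alt (number : Int) (from_last_digit : Bool) : List Int :=
  let digits := pvBdigits (PySem.Int.toStr number).length number
  if from_last_digit then pvEveryOther digits else pvEveryOther (digits.drop 1)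

-- ===== PRECONDITION & SPEC =====
def Spec_every_other_digit (number : Int) (from_last_digit : Bool) (out : List Int) : Prop := out = every_other_digit_alt number from_last_digit
instance (number : Int) (from_last_digit : Bool) (out : List Int) : Decidable (Spec_every_other_digit number from_last_digit out) := by unfold Spec_every_other_digit; infer_instance

-- ===== CLAIM (what is proved, stated in full; the proofs are below) =====
def Claim_equal_every_other_digit : Prop := ∀ (number : Int) (from_last_digit : Bool), Dom_every_other_digit number from_last_digit → Spec_every_other_digit number from_last_digit (every_other_digit number from_last_digit)

-- ===== LEMMAS AND PROOFS =====
theorem pvEveryOther_cons (x : Int) (r : List Int) :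
    pvEveryOther (x :: r) = x :: pvEveryOther (r.drop 1) := by
  cases r <;> simp [pvEveryOther]

theorem pvAloop_eq (n : Nat) : ∀ (number : Int) (digits : List Int) (cur : Bool),
    pvAloop n digits cur number =
      digits ++ (if cur then pvEveryOther (pvBdigits n number)
                 else pvEveryOther ((pvBdigits n number).drop 1)) := by
  induction n with
  | zero => intro number digits cur; cases cur <;> simp [pvAloop, pvBdigits, pvEveryOther]
  | succ n ih =>
    intro number digits cur
    cases cur with
    | false => simp [pvAloop, pvBdigits, ih]
    | true => simp [pvAloop, pvBdigits, ih, pvEveryOther_cons]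

-- ===== VERDICT (by name: the statement is the Claim_ definition above) =====
theorem every_other_digit_spec : Claim_equal_every_other_digit := by
  intro number from_last_digit _
  unfold Spec_every_other_digit every_other_digit every_other_digit_alt
  rw [pvAloop_eq]
  cases from_last_digit <;> simp
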